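-- pv_equiv track=rewrite | github.com/AidenPQ/Advent-of-code | 2024/Day6/guard_gallivant.py | detect_cycle_start
-- ===== SOURCE A (Python) =====
-- def detect_cycle_start(my_list, min_pattern_length=1):
--     """
--     Detects if the end of the list contains a repeating pattern.
--     Returns the index where the cycle starts, or None if no cycle detected.
--     """
--     list_len = len(my_list)
--
--
--     for pattern_length in range(min_pattern_length, list_len // 2 + 1):
--
--         if list_len < pattern_length * 2:
--             continue
--
--         last_pattern = my_list[-pattern_length:]
--         previous_pattern = my_list[-2*pattern_length:-pattern_length]
--
--         if last_pattern == previous_pattern: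
--             if list_len >= pattern_length * 3:
--                 third_pattern = my_list[-3*pattern_length:-2*pattern_length]
--                 if third_pattern == last_pattern:
--                     cycle_start = list_len - 3 * pattern_length
--                     return cycle_start, pattern_length
--             else:
--                 cycle_start = list_len - 2 * pattern_length
--                 return cycle_start, pattern_length
--
--     return None, None
-- ===== SOURCE B (Python) =====
-- def detect_cycle_start(my_list, min_pattern_length=1):
--     # Build the Z-array of the reversed list once (classic l/r window),
--     # then each candidate period's block matches are table lookups.
--     n = len(my_list)
--     r = my_list[::-1]
--     z = [0] * n
--     if n:
--         z[0] = n
--     l = rgt = 0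
--     for i in range(1, n):
--         k = min(rgt - i, z[i - l]) if i < rgt else 0
--         while i + k < n and r[k] == r[i + k]:
--             k += 1
--         z[i] = k
--         if i + k > rgt:
--             l, rgt = i, i + k
--     for p in range(max(min_pattern_length, 1), n // 2 + 1):
--         if z[p] >= p:
--             if 3 * p <= n and z[2 * p] >= p:
--                 return n - 3 * p, p
--             if n < 3 * p:
--                 return n - 2 * p, p
--     return None, None
-- ===== Notes on version B (the rewrite author's own statement) =====
-- stated objective: alternative
-- what changed: B computes the Z-array of the reversed list once with the l/r-window algorithm and then answers every candidate period's block comparisons by table lookups, instead of A's per-period slice extraction and comparison; A's early return can still win on easy inputs, so no speed is claimed.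
-- intended difference: When len(my_list) + min_pattern_length <= 0, Python's negative-slice arithmetic makes all of A's pattern slices empty so A immediately returns the meaningless tuple (len - 3*min_pattern_length, min_pattern_length) with a non-positive 'pattern length'; B only considers genuine pattern lengths >= 1 and returns (None, None) or a real pattern, which is the intended behaviour. — e.g. on detect_cycle_start([], 0): A returns (some 0, some 0), B returns (none, none)
import Mathlib
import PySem

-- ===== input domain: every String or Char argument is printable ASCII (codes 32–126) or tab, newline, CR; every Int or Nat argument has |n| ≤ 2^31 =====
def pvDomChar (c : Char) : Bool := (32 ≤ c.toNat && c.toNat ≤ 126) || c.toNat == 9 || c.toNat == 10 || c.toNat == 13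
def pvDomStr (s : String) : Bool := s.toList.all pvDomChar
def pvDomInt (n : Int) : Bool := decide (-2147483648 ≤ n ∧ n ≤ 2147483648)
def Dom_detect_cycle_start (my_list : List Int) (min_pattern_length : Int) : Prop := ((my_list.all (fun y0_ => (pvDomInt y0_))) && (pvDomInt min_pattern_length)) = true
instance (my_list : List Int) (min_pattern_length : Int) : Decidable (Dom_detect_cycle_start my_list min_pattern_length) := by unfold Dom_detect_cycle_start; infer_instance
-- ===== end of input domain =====

-- B builds the Z-array of the reversed list once (l/r-window algorithm) and reads every
-- candidate period's block matches off that table, instead of A's per-period slice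
-- extraction and comparison (objective: alternative algorithm, not measured faster).

-- ===== PORT A =====
-- the for-loop of A: recursion over the successive values of pattern_length
-- (fuel = number of remaining iterations of range(min_pattern_length, list_len//2+1))
def aLoop (my_list : List Int) (list_len : Int) : Nat → Int → Option Int × Option Int
  | 0, _ => (none, none)
  | fuel + 1, pattern_length =>
    if list_len < pattern_length * 2 then aLoop my_list list_len fuel (pattern_length + 1)
    else
      let last_pattern := PySem.List.slice my_list (some (-pattern_length)) none
      let previous_pattern := PySem.List.slice my_list (some (-(2 * pattern_length))) (some (-pattern_length))
      if last_pattern = previous_pattern then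
        if list_len ≥ pattern_length * 3 then
          let third_pattern := PySem.List.slice my_list (some (-(3 * pattern_length))) (some (-(2 * pattern_length)))
          if third_pattern = last_pattern then
            (some (list_len - 3 * pattern_length), some pattern_length)
          else aLoop my_list list_len fuel (pattern_length + 1)
        else (some (list_len - 2 * pattern_length), some pattern_length)
      else aLoop my_list list_len fuel (pattern_length + 1)

def detect_cycle_start (my_list : List Int) (min_pattern_length : Int) : Option Int × Option Int :=
  let list_len : Int := my_list.length
  aLoop my_list list_len
    ((PySem.Int.floordiv list_len 2 + 1 - min_pattern_length).toNat) min_pattern_length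

-- ===== PORT B =====
-- the inner while-loop of Source B: extend the match length k while i+k < n and r[k] == r[i+k]
-- (indices are Nat: every index Source B uses here is provably nonnegative)
def zExtend (r : List Int) (i : Nat) (k : Nat) : Nat :=
  if h : i + k < r.length ∧ r.getD k 0 = r.getD (i + k) 0 then
    zExtend r i (k + 1)
  else k
termination_by r.length - (i + k)
decreasing_by omega

-- one iteration of Source B's Z-array loop; state = (z, l, rgt)
def zStep (r : List Int) (st : List Nat × Nat × Nat) (i : Nat) : List Nat × Nat × Nat :=
  let z := st.1
  let l := st.2.1
  let rgt := st.2.2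
  let k0 := if i < rgt then min (rgt - i) (z.getD (i - l) 0) else 0
  let k := zExtend r i k0
  let z' := z.set i k
  if rgt < i + k then (z', i, i + k) else (z', l, rgt)

-- z = [0]*n; z[0] = n (if n); then for i in range(1, n): ...
def zArray (r : List Int) : List Nat :=
  let n := r.length
  ((List.range' 1 (n - 1)).foldl (zStep r) ((List.replicate n 0).set 0 n, 0, 0)).1

-- the second for-loop of Source B: scan candidate periods, reading matches off the z table
def bScan (z : List Nat) (n : Int) : List Int → Option Int × Option Int
  | [] => (none, none)
  | p :: rest =>
    if p ≤ (z.getD p.toNat 0 : Int) then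
      if 3 * p ≤ n ∧ p ≤ (z.getD (2 * p).toNat 0 : Int) then
        (some (n - 3 * p), some p)
      else if n < 3 * p then (some (n - 2 * p), some p)
      else bScan z n rest
    else bScan z n rest

def detect_cycle_start_alt (my_list : List Int) (min_pattern_length : Int) : Option Int × Option Int :=
  let n : Int := my_list.length
  let r := my_list.reverse  -- my_list[::-1]
  let z := zArray r
  bScan z n (PySem.List.pyRange (max min_pattern_length 1) (PySem.Int.floordiv n 2 + 1) 1)

-- ===== PRECONDITION & SPEC =====
-- When len(my_list) + min_pattern_length ≤ 0, Python's negative-slice arithmetic makes all of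
-- A's pattern slices empty, so A immediately returns the meaningless tuple
-- (len - 3*min_pattern_length, min_pattern_length) with a non-positive "pattern length";
-- B only considers genuine pattern lengths ≥ 1 and returns (None, None) or a real pattern,
-- which is the intended behaviour.
def D_detect_cycle_start (my_list : List Int) (min_pattern_length : Int) : Prop :=
  (my_list.length : Int) + min_pattern_length ≤ 0

instance (my_list : List Int) (min_pattern_length : Int) : Decidable (D_detect_cycle_start my_list min_pattern_length) := by unfold D_detect_cycle_start; infer_instance

def Spec_detect_cycle_start (my_list : List Int) (min_pattern_length : Int) (out : Option Int × Option Int) : Prop := ¬ D_detect_cycle_start my_list min_pattern_length → out = detect_cycle_start_alt my_list min_pattern_length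
instance (my_list : List Int) (min_pattern_length : Int) (out : Option Int × Option Int) : Decidable (Spec_detect_cycle_start my_list min_pattern_length out) := by unfold Spec_detect_cycle_start; infer_instance

def pvDiffWitness_detect_cycle_start : List Int × Int := ([], 0)
def pvDiffWitnessOut_detect_cycle_start : (Option Int × Option Int) × (Option Int × Option Int) :=
  ((some 0, some 0), (none, none))

-- ===== CLAIM (what is proved, stated in full; the proofs are below) =====
def Claim_unchanged_detect_cycle_start : Prop := ∀ (my_list : List Int) (min_pattern_length : Int), Dom_detect_cycle_start my_list min_pattern_length → Spec_detect_cycle_start my_list min_pattern_length (detect_cycle_start my_list min_pattern_length)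
def Claim_changed_detect_cycle_start : Prop := Dom_detect_cycle_start (pvDiffWitness_detect_cycle_start.1) (pvDiffWitness_detect_cycle_start.2) ∧ D_detect_cycle_start (pvDiffWitness_detect_cycle_start.1) (pvDiffWitness_detect_cycle_start.2) ∧ detect_cycle_start (pvDiffWitness_detect_cycle_start.1) (pvDiffWitness_detect_cycle_start.2) = pvDiffWitnessOut_detect_cycle_start.1 ∧ detect_cycle_start_alt (pvDiffWitness_detect_cycle_start.1) (pvDiffWitness_detect_cycle_start.2) = pvDiffWitnessOut_detect_cycle_start.2 ∧ pvDiffWitnessOut_detect_cycle_start.1 ≠ pvDiffWitnessOut_detect_cycle_start.2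
def Claim_exact_detect_cycle_start : Prop := ∀ (my_list : List Int) (min_pattern_length : Int), Dom_detect_cycle_start my_list min_pattern_length → D_detect_cycle_start my_list min_pattern_length → detect_cycle_start my_list min_pattern_length ≠ detect_cycle_start_alt my_list min_pattern_length

-- ===== LEMMAS AND PROOFS =====

-- list-based rendering of A's loop (proof helper)
def aLoopL (my_list : List Int) (list_len : Int) : List Int → Option Int × Option Int
  | [] => (none, none)
  | pattern_length :: rest =>
    if list_len < pattern_length * 2 then aLoopL my_list list_len rest
    else
      let last_pattern := PySem.List.slice my_list (some (-pattern_length)) none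
      let previous_pattern := PySem.List.slice my_list (some (-(2 * pattern_length))) (some (-pattern_length))
      if last_pattern = previous_pattern then
        if list_len ≥ pattern_length * 3 then
          let third_pattern := PySem.List.slice my_list (some (-(3 * pattern_length))) (some (-(2 * pattern_length)))
          if third_pattern = last_pattern then
            (some (list_len - 3 * pattern_length), some pattern_length)
          else aLoopL my_list list_len rest
        else (some (list_len - 2 * pattern_length), some pattern_length)
      else aLoopL my_list list_len rest

lemma aLoop_eq_aLoopL (l : List Int) (n : Int) :
    ∀ (fuel : ℕ) (p : Int), aLoop l n fuel p = aLoopL l n (PySem.List.pyRange p (p + fuel) 1) := by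
  intro fuel
  induction fuel with
  | zero =>
    intro p
    rw [PySem.List.pyRange_one]
    simp [aLoop, aLoopL]
  | succ f ih =>
    intro p
    rw [PySem.List.pyRange_one_cons (by omega)]
    have harg : p + 1 + (f : Int) = p + ((f : ℕ) + 1 : ℕ) := by push_cast; ring
    simp only [aLoop, aLoopL]
    rw [ih (p + 1), harg]

lemma detect_eq_aLoopL (l : List Int) (m : Int) :
    detect_cycle_start l m
      = aLoopL l (l.length : Int)
          (PySem.List.pyRange m (PySem.Int.floordiv (l.length : Int) 2 + 1) 1) := by
  show aLoop l (l.length : Int)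
      ((PySem.Int.floordiv (l.length : Int) 2 + 1 - m).toNat) m = _
  rw [aLoop_eq_aLoopL]
  by_cases hm : m ≤ PySem.Int.floordiv (l.length : Int) 2 + 1
  · congr 1
    congr 1
    omega
  · rw [PySem.List.pyRange_one, PySem.List.pyRange_one]
    have e1 : (m + ((PySem.Int.floordiv (l.length : Int) 2 + 1 - m).toNat : Int) - m).toNat = 0 := by omega
    have e2 : (PySem.Int.floordiv (l.length : Int) 2 + 1 - m).toNat = 0 := by omega
    rw [e1, e2]

-- specification of all the Z-machinery: the common-prefix length of two lists
def matchLen : List Int → List Int → Int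
  | a :: as, b :: bs => if a = b then 1 + matchLen as bs else 0
  | _, _ => 0

lemma matchLen_nonneg : ∀ (xs ys : List Int), 0 ≤ matchLen xs ys := by
  intro xs
  induction xs with
  | nil => intro ys; simp [matchLen]
  | cons a as ih =>
    intro ys
    cases ys with
    | nil => simp [matchLen]
    | cons b bs =>
      simp only [matchLen]
      split
      · have := ih bs; omega
      · omega

lemma le_matchLen_iff : ∀ (xs ys : List Int) (p : ℕ),
    ((p : Int) ≤ matchLen xs ys) ↔
      (p ≤ xs.length ∧ p ≤ ys.length ∧ xs.take p = ys.take p) := by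
  intro xs
  induction xs with
  | nil =>
    intro ys p
    simp only [matchLen, List.length_nil, List.take_nil]
    constructor
    · intro h
      have : p = 0 := by exact_mod_cast Int.le_antisymm h (by positivity)
      subst this; simp
    · rintro ⟨h, -, -⟩; omega
  | cons a as ih =>
    intro ys p
    cases ys with
    | nil =>
      simp only [matchLen, List.length_nil, List.take_nil]
      constructor
      · intro h
        have : p = 0 := by omega
        subst this; simp
      · rintro ⟨-, h, -⟩; omega
    | cons b bs =>
      by_cases hab : a = b
      · subst hab
        cases p with
        | zero =>
          have := matchLen_nonneg as bs
          simp [matchLen]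
          omega
        | succ q =>
          simp only [matchLen, List.length_cons, List.take_succ_cons,
            List.cons.injEq, true_and]
          have := ih bs q
          push_cast
          constructor
          · intro h
            have hq : (q : Int) ≤ matchLen as bs := by omega
            obtain ⟨h1, h2, h3⟩ := (ih bs q).mp hq
            exact ⟨by omega, by omega, h3⟩
          · rintro ⟨h1, h2, h3⟩
            have := (ih bs q).mpr ⟨by omega, by omega, h3⟩
            omega
      · simp only [matchLen, if_neg hab]
        cases p with
        | zero => simp
        | succ q =>
          simp only [List.take_succ_cons, List.cons.injEq]
          constructor
          · intro h; omega
          · rintro ⟨-, -, h, -⟩; exact absurd h hab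

lemma matchLen_le_right : ∀ (xs ys : List Int), matchLen xs ys ≤ (ys.length : Int) := by
  intro xs
  induction xs with
  | nil => intro ys; simp [matchLen]
  | cons a as ih =>
    intro ys
    cases ys with
    | nil => simp [matchLen]
    | cons b bs =>
      simp only [matchLen, List.length_cons]
      split
      · have := ih bs; push_cast; omega
      · push_cast; positivity

-- pointwise (getD) form of le_matchLen_iff, the form the Z-algorithm's tests use
lemma le_matchLen_iff' (xs ys : List Int) (p : ℕ) :
    ((p : Int) ≤ matchLen xs ys) ↔
      (p ≤ xs.length ∧ p ≤ ys.length ∧ ∀ j < p, xs.getD j 0 = ys.getD j 0) := by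
  rw [le_matchLen_iff]
  constructor
  · rintro ⟨h1, h2, h3⟩
    refine ⟨h1, h2, fun j hj => ?_⟩
    have := congrArg (fun t => t.getD j 0) h3
    simpa [List.getD, List.getElem?_take, hj] using this
  · rintro ⟨h1, h2, h3⟩
    refine ⟨h1, h2, ?_⟩
    apply List.ext_getElem
    · simp [h1, h2]
    · intro j hj1 hj2
      have hjp : j < p := by simp at hj1; omega
      have hx : j < xs.length := lt_of_lt_of_le hjp h1
      have hy : j < ys.length := lt_of_lt_of_le hjp h2
      have := h3 j hjp
      simp only [List.getD, List.getElem?_eq_getElem, hx, hy, Option.getD_some] at this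
      simpa [List.getElem_take] using this

lemma getD_drop (r : List Int) (a j : Nat) : (r.drop a).getD j 0 = r.getD (a + j) 0 := by
  simp [List.getD, List.getElem?_drop]

-- the while-loop computes matchLen exactly, from any sound starting value k
lemma zExtend_correct_aux (r : List Int) (i : Nat) (hi : 0 < i) :
    ∀ (d k : Nat), r.length - (i + k) ≤ d → (k : Int) ≤ matchLen r (r.drop i) →
      (zExtend r i k : Int) = matchLen r (r.drop i) := by
  intro d
  induction d with
  | zero =>
    intro k hd hk
    rw [zExtend, dif_neg (by omega : ¬(i + k < r.length ∧ r.getD k 0 = r.getD (i + k) 0))]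
    have hle := matchLen_le_right r (r.drop i)
    simp only [List.length_drop] at hle
    omega
  | succ d ih =>
    intro k hd hk
    rw [zExtend]
    by_cases h : i + k < r.length ∧ r.getD k 0 = r.getD (i + k) 0
    · rw [dif_pos h]
      apply ih (k + 1) (by omega)
      have : ((k + 1 : Nat) : Int) ≤ matchLen r (r.drop i) := by
        rw [le_matchLen_iff']
        refine ⟨by omega, by simp only [List.length_drop]; omega, ?_⟩
        intro j hj
        rcases Nat.lt_succ_iff_lt_or_eq.mp hj with hj' | rfl
        · exact ((le_matchLen_iff' r (r.drop i) k).mp hk).2.2 j hj'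
        · rw [getD_drop]; exact h.2
      push_cast at this ⊢
      exact this
    · rw [dif_neg h]
      by_cases hb : i + k < r.length
      · have hne : r.getD k 0 ≠ r.getD (i + k) 0 := fun he => h ⟨hb, he⟩
        have hlt : ¬(((k + 1 : Nat) : Int) ≤ matchLen r (r.drop i)) := by
          rw [le_matchLen_iff']
          rintro ⟨-, -, h3⟩
          have := h3 k (by omega)
          rw [getD_drop] at this
          exact hne this
        push_cast at hlt
        omega
      · have hle := matchLen_le_right r (r.drop i)
        simp only [List.length_drop] at hle
        omega

lemma zExtend_eq (r : List Int) (i : Nat) (hi : 0 < i) (k : Nat)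
    (hk : (k : Int) ≤ matchLen r (r.drop i)) :
    (zExtend r i k : Int) = matchLen r (r.drop i) :=
  zExtend_correct_aux r i hi r.length k (by omega) hk

-- invariant of Source B's Z loop at the start of iteration i
def ZInv (r : List Int) (i : Nat) (st : List Nat × Nat × Nat) : Prop :=
  st.1.length = r.length ∧
  (∀ j, 1 ≤ j → j < i → ((st.1.getD j 0 : Int) = matchLen r (r.drop j))) ∧
  st.2.1 < i ∧ st.2.2 ≤ r.length ∧
  ((st.2.2 - st.2.1 : Nat) : Int) ≤ matchLen r (r.drop st.2.1) ∧
  (st.2.1 = 0 → st.2.2 = 0)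

lemma zStep_inv (r : List Int) (i : Nat) (st : List Nat × Nat × Nat)
    (hinv : ZInv r i st) (hi : 1 ≤ i) (hin : i < r.length) :
    ZInv r (i + 1) (zStep r st i) := by
  obtain ⟨z, l, rgt⟩ := st
  obtain ⟨hlen, hz, hl, hr, hw, h0⟩ := hinv
  simp only at hlen hz hl hr hw h0
  -- the starting value k0 is sound: k0 ≤ matchLen r (r.drop i)
  have hk0 : ((if i < rgt then min (rgt - i) (z.getD (i - l) 0) else 0 : Nat) : Int)
      ≤ matchLen r (r.drop i) := by
    split_ifs with hir
    · have hl1 : 1 ≤ l := by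
        rcases Nat.eq_zero_or_pos l with h | h
        · exact absurd (h0 h) (by omega)
        · exact h
      have hjl : 1 ≤ i - l := by omega
      have hji : i - l < i := by omega
      have hzj := hz (i - l) hjl hji
      have hmin1 : min (rgt - i) (z.getD (i - l) 0) ≤ rgt - i := min_le_left _ _
      have hmin2 : min (rgt - i) (z.getD (i - l) 0) ≤ z.getD (i - l) 0 := min_le_right _ _
      rw [le_matchLen_iff']
      refine ⟨by omega, by simp only [List.length_drop]; omega, ?_⟩
      intro t ht
      have ht1 : t < z.getD (i - l) 0 := by omega
      have ht2 : t < rgt - i := by omega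
      -- r[t] = r[(i-l)+t] from z[i-l]
      have e1 : r.getD t 0 = r.getD ((i - l) + t) 0 := by
        have := ((le_matchLen_iff' r (r.drop (i - l)) (z.getD (i - l) 0)).mp hzj.le).2.2 t ht1
        rwa [getD_drop] at this
      -- r[(i-l)+t] = r[l + ((i-l)+t)] = r[i+t] from the window
      have e2 : r.getD ((i - l) + t) 0 = r.getD (i + t) 0 := by
        have hwin := ((le_matchLen_iff' r (r.drop l) (rgt - l)).mp hw).2.2 ((i - l) + t) (by omega)
        rw [getD_drop] at hwin
        have : l + ((i - l) + t) = i + t := by omega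
        rw [this] at hwin
        exact hwin
      rw [getD_drop]
      exact e1.trans e2
    · simpa using matchLen_nonneg r (r.drop i)
  have hk := zExtend_eq r i (by omega) _ hk0
  generalize hkg : zExtend r i (if i < rgt then min (rgt - i) (z.getD (i - l) 0) else 0) = k at hk
  have hkn : (k : Int) ≤ (r.length : Int) - i := by
    have := matchLen_le_right r (r.drop i)
    simp only [List.length_drop] at this
    omega
  have hzval : ∀ j, 1 ≤ j → j < i + 1 → (((z.set i k).getD j 0 : Int) = matchLen r (r.drop j)) := by
    intro j hj1 hj2
    by_cases hji : j = i
    · subst hji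
      rw [show (z.set j k).getD j 0 = k from by simp [List.getD, hlen ▸ hin]]
      exact hk
    · rw [show (z.set i k).getD j 0 = z.getD j 0 from by simp [List.getD, Ne.symm hji]]
      exact hz j hj1 (by omega)
  show ZInv r (i + 1) (zStep r (z, l, rgt) i)
  simp only [zStep]
  rw [hkg]
  split_ifs with hnew
  · exact ⟨by simpa using hlen, hzval, show i < i + 1 by omega,
      show i + k ≤ r.length by omega,
      show ((i + k - i : Nat) : Int) ≤ matchLen r (r.drop i) by
        have he : i + k - i = k := by omega
        rw [he, hk],
      show i = 0 → i + k = 0 from fun h => absurd h (by omega)⟩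
  · exact ⟨by simpa using hlen, hzval, show l < i + 1 by omega, hr, hw, h0⟩

lemma zFold_inv (r : List Int) :
    ∀ (len start : Nat) (st : List Nat × Nat × Nat), ZInv r start st → 1 ≤ start →
      start + len ≤ r.length →
      ZInv r (start + len) ((List.range' start len).foldl (zStep r) st) := by
  intro len
  induction len with
  | zero => intro start st h _ _; simpa using h
  | succ d ih =>
    intro start st h h1 h2
    rw [List.range'_succ, List.foldl_cons]
    have := ih (start + 1) (zStep r st start) (zStep_inv r start st h h1 (by omega)) (by omega) (by omega)
    have e : start + 1 + d = start + (d + 1) := by omega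
    rwa [e] at this

lemma zArray_getD (r : List Int) (j : Nat) (h1 : 1 ≤ j) (h2 : j < r.length) :
    ((zArray r).getD j 0 : Int) = matchLen r (r.drop j) := by
  have hn : 1 ≤ r.length := by omega
  have hinit : ZInv r 1 ((List.replicate r.length 0).set 0 r.length, 0, 0) := by
    refine ⟨by simp, fun j hj1 hj2 => by omega, show (0:Nat) < 1 by omega,
      show (0:Nat) ≤ r.length by omega, ?_, fun _ => rfl⟩
    simpa using matchLen_nonneg r r
  have := zFold_inv r (r.length - 1) 1 _ hinit (by omega) (by omega)
  rw [show 1 + (r.length - 1) = r.length from by omega] at this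
  exact this.2.1 j h1 h2

-- ===== the A-side slice conditions, re-expressed through matchLen on the reversed list =====

lemma slice_negq_negq (l : List Int) (j k : ℕ) (hj : 0 < j) (hk : 0 < k) :
    PySem.List.slice l (some (-(j:Int))) (some (-(k:Int))) =
      (l.drop (l.length - j)).take ((l.length - k) - (l.length - j)) := by
  unfold PySem.List.slice
  simp only [PySem.List.clampIdx_neg_natCast l.length j hj, PySem.List.clampIdx_neg_natCast l.length k hk]

lemma cond1_iff (l : List Int) (q : ℕ) (hq : 0 < q) (h2 : 2 * q ≤ l.length) :
    ((q : Int) ≤ matchLen l.reverse (l.reverse.drop q)) ↔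
      (PySem.List.slice l (some (-(q : Int))) none
        = PySem.List.slice l (some (-(2 * (q : Int)))) (some (-(q : Int)))) := by
  rw [PySem.List.slice_from_neg_natCast l q hq]
  have e2 : (-(2 * (q : Int))) = -(((2 * q : ℕ) : Int)) := by push_cast; ring
  rw [e2, slice_negq_negq l (2*q) q (by omega) hq]
  rw [le_matchLen_iff]
  have ht1 : List.take q l.reverse = (List.drop (l.length - q) l).reverse :=
    List.take_reverse
  have ht2 : List.take q (List.drop q l.reverse)
      = ((List.drop (l.length - 2*q) l).take ((l.length - q) - (l.length - 2*q))).reverse := by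
    rw [List.drop_reverse, List.take_reverse, List.length_take, List.drop_take]
    have hmin : min (l.length - q) l.length - q = l.length - 2*q := by omega
    rw [hmin]
  constructor
  · rintro ⟨-, -, h⟩
    rw [ht1, ht2, List.reverse_inj] at h
    exact h
  · intro h
    refine ⟨by simp only [List.length_reverse]; omega, by simp only [List.length_drop, List.length_reverse]; omega, ?_⟩
    rw [ht1, ht2, List.reverse_inj]
    exact h

lemma cond2_iff (l : List Int) (q : ℕ) (hq : 0 < q) (h3 : 3 * q ≤ l.length) :
    ((q : Int) ≤ matchLen l.reverse (l.reverse.drop (2 * q))) ↔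
      (PySem.List.slice l (some (-(3 * (q : Int)))) (some (-(2 * (q : Int))))
        = PySem.List.slice l (some (-(q : Int))) none) := by
  have e3 : (-(3 * (q : Int))) = -(((3 * q : ℕ) : Int)) := by push_cast; ring
  have e2 : (-(2 * (q : Int))) = -(((2 * q : ℕ) : Int)) := by push_cast; ring
  rw [PySem.List.slice_from_neg_natCast l q hq]
  rw [e3, e2, slice_negq_negq l (3 * q) (2 * q) (by omega) (by omega)]
  rw [le_matchLen_iff]
  have ht1 : List.take q l.reverse = (List.drop (l.length - q) l).reverse :=
    List.take_reverse
  have ht2 : List.take q (List.drop (2 * q) l.reverse)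
      = ((List.drop (l.length - 3*q) l).take ((l.length - 2*q) - (l.length - 3*q))).reverse := by
    rw [List.drop_reverse, List.take_reverse, List.length_take, List.drop_take]
    have hmin : min (l.length - 2*q) l.length - q = l.length - 3*q := by omega
    rw [hmin]
  constructor
  · rintro ⟨-, -, h⟩
    rw [ht1, ht2, List.reverse_inj] at h
    exact h.symm
  · intro h
    refine ⟨by simp only [List.length_reverse]; omega,
      by simp only [List.length_drop, List.length_reverse]; omega, ?_⟩
    rw [ht1, ht2, List.reverse_inj]
    exact h.symm

-- A's loop and B's table scan agree on any list of genuine candidate periods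
lemma loop_agree (l : List Int) (ps : List Int)
    (h : ∀ p ∈ ps, 1 ≤ p ∧ 2 * p ≤ (l.length : Int)) :
    aLoopL l (l.length : Int) ps = bScan (zArray l.reverse) (l.length : Int) ps := by
  induction ps with
  | nil => rfl
  | cons p rest ih =>
    obtain ⟨hp1, hp2⟩ := h p (List.mem_cons_self ..)
    have ih' := ih (fun x hx => h x (List.mem_cons_of_mem _ hx))
    obtain ⟨q, rfl⟩ : ∃ q : ℕ, p = (q : Int) :=
      ⟨p.toNat, (Int.toNat_of_nonneg (by omega)).symm⟩
    have hq : 0 < q := by exact_mod_cast hp1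
    have h2 : 2 * q ≤ l.length := by omega
    have hrl : l.reverse.length = l.length := List.length_reverse
    have hz1 : (((zArray l.reverse).getD ((q : Int)).toNat 0 : Nat) : Int)
        = matchLen l.reverse (l.reverse.drop q) := by
      rw [Int.toNat_natCast]
      exact zArray_getD l.reverse q hq (by omega)
    simp only [aLoopL, bScan]
    rw [hz1, if_neg (show ¬((l.length : Int) < (q : Int) * 2) by omega)]
    by_cases h1 : PySem.List.slice l (some (-(q : Int))) none
        = PySem.List.slice l (some (-(2 * (q : Int)))) (some (-(q : Int)))
    · rw [if_pos h1, if_pos ((cond1_iff l q hq h2).mpr h1)]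
      by_cases h3 : 3 * (q : Int) ≤ (l.length : Int)
      · have h3' : 3 * q ≤ l.length := by omega
        have hz2 : (((zArray l.reverse).getD ((2 * (q : Int))).toNat 0 : Nat) : Int)
            = matchLen l.reverse (l.reverse.drop (2 * q)) := by
          rw [show (2 * (q : Int)).toNat = 2 * q from by omega]
          exact zArray_getD l.reverse (2 * q) (by omega) (by omega)
        by_cases hc2 : PySem.List.slice l (some (-(3 * (q : Int)))) (some (-(2 * (q : Int))))
            = PySem.List.slice l (some (-(q : Int))) none
        · rw [if_pos (show (l.length : Int) ≥ (q : Int) * 3 by omega), if_pos hc2,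
            if_pos ⟨h3, by rw [hz2]; exact (cond2_iff l q hq h3').mpr hc2⟩]
        · rw [if_pos (show (l.length : Int) ≥ (q : Int) * 3 by omega), if_neg hc2,
            if_neg (show ¬(3 * (q : Int) ≤ (l.length : Int) ∧
                (q : Int) ≤ (((zArray l.reverse).getD ((2 * (q : Int))).toNat 0 : Nat) : Int))
              from fun hand => hc2 ((cond2_iff l q hq h3').mp (by rw [← hz2]; exact hand.2))),
            if_neg (show ¬((l.length : Int) < 3 * (q : Int)) by omega)]
          exact ih'
      · rw [if_neg (show ¬((l.length : Int) ≥ (q : Int) * 3) by omega),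
          if_neg (show ¬(3 * (q : Int) ≤ (l.length : Int) ∧
              (q : Int) ≤ (((zArray l.reverse).getD ((2 * (q : Int))).toNat 0 : Nat) : Int))
            from fun hand => h3 hand.1),
          if_pos (show (l.length : Int) < 3 * (q : Int) by omega)]
    · rw [if_neg h1,
        if_neg (show ¬((q : Int) ≤ matchLen l.reverse (l.reverse.drop q))
          from fun hb => h1 ((cond1_iff l q hq h2).mp hb))]
      exact ih'

lemma aLoopL_skip (l : List Int) (qs : List Int) (ps : List Int)
    (h : ∀ p ∈ ps, p ≤ 0 ∧ -p < (l.length : Int)) :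
    aLoopL l (l.length : Int) (ps ++ qs) = aLoopL l (l.length : Int) qs := by
  induction ps with
  | nil => rfl
  | cons p rest ih =>
    obtain ⟨hp0, hpn⟩ := h p (List.mem_cons_self ..)
    have ih' := ih (fun x hx => h x (List.mem_cons_of_mem _ hx))
    have hn : (0:Int) ≤ (l.length : Int) := by positivity
    simp only [List.cons_append, aLoopL]
    have hcond : ¬ (PySem.List.slice l (some (-p)) none
        = PySem.List.slice l (some (-(2 * p))) (some (-p))) := by
      intro hEq
      rw [PySem.List.slice_from l (by omega : (0:Int) ≤ -p)] at hEq
      rw [PySem.List.slice_toNat l (by omega) (by omega)] at hEq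
      have htz : (-p).toNat - (-(2 * p)).toNat = 0 := by omega
      rw [htz, List.take_zero] at hEq
      have := List.drop_eq_nil_iff.mp hEq
      omega
    rw [if_neg (by omega), if_neg hcond]
    exact ih'

lemma bScan_shape (z : List Nat) (n : Int) (ps : List Int) :
    bScan z n ps = (none, none) ∨ ∃ c p, p ∈ ps ∧ bScan z n ps = (some c, some p) := by
  induction ps with
  | nil => left; rfl
  | cons p rest ih =>
    simp only [bScan]
    split_ifs with h1 h2 h3
    · exact Or.inr ⟨n - 3 * p, p, List.mem_cons_self .., rfl⟩
    · exact Or.inr ⟨n - 2 * p, p, List.mem_cons_self .., rfl⟩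
    · rcases ih with h | ⟨c, x, hx, he⟩
      · exact Or.inl h
      · exact Or.inr ⟨c, x, List.mem_cons_of_mem _ hx, he⟩
    · rcases ih with h | ⟨c, x, hx, he⟩
      · exact Or.inl h
      · exact Or.inr ⟨c, x, List.mem_cons_of_mem _ hx, he⟩

lemma a_in_D (l : List Int) (m : Int) (hD : (l.length : Int) + m ≤ 0) :
    detect_cycle_start l m = (some ((l.length : Int) - 3 * m), some m) := by
  have hn : (0:Int) ≤ (l.length : Int) := by positivity
  have hm : m ≤ 0 := by omega
  have hfd : (0:Int) ≤ PySem.Int.floordiv (l.length : Int) 2 := by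
    rw [PySem.Int.floordiv_eq_ediv_of_pos (by norm_num)]; omega
  rw [detect_eq_aLoopL]
  rw [PySem.List.pyRange_one_cons (by omega)]
  simp only [aLoopL]
  have hlast : PySem.List.slice l (some (-m)) none = [] := by
    rw [PySem.List.slice_from l (by omega)]
    exact List.drop_eq_nil_iff.mpr (by omega)
  have hprev : PySem.List.slice l (some (-(2 * m))) (some (-m)) = [] := by
    rw [PySem.List.slice_toNat l (by omega) (by omega)]
    have htz : (-m).toNat - (-(2 * m)).toNat = 0 := by omega
    rw [htz, List.take_zero]
  have hthird : PySem.List.slice l (some (-(3 * m))) (some (-(2 * m))) = [] := by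
    rw [PySem.List.slice_toNat l (by omega) (by omega)]
    have htz : (-(2 * m)).toNat - (-(3 * m)).toNat = 0 := by omega
    rw [htz, List.take_zero]
  rw [if_neg (by omega), hlast, hprev, hthird, if_pos rfl, if_pos (by omega), if_pos rfl]

-- ===== VERDICT (by name: the statement is the Claim_ definition above) =====
theorem detect_cycle_start_spec : Claim_unchanged_detect_cycle_start := by
  unfold Claim_unchanged_detect_cycle_start Spec_detect_cycle_start D_detect_cycle_start
  intro l m _hdom hnD
  have hn : (0:Int) ≤ (l.length : Int) := by positivity
  have hfd : PySem.Int.floordiv (l.length : Int) 2 = (l.length : Int) / 2 :=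
    PySem.Int.floordiv_eq_ediv_of_pos (by norm_num)
  show detect_cycle_start l m = detect_cycle_start_alt l m
  rw [detect_eq_aLoopL]
  show aLoopL l (l.length : Int)
      (PySem.List.pyRange m (PySem.Int.floordiv (l.length : Int) 2 + 1) 1)
    = bScan (zArray l.reverse) (l.length : Int)
      (PySem.List.pyRange (max m 1) (PySem.Int.floordiv (l.length : Int) 2 + 1) 1)
  by_cases hm : 1 ≤ m
  · rw [max_eq_left hm]
    apply loop_agree
    intro p hp
    rw [PySem.List.mem_pyRange_one] at hp
    rw [hfd] at hp
    exact ⟨by omega, by omega⟩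
  · have hm0 : m ≤ 0 := by omega
    have hmn : -m < (l.length : Int) := by omega
    rw [max_eq_right (by omega)]
    rw [PySem.List.pyRange_one_append m 1 (PySem.Int.floordiv (l.length : Int) 2 + 1)
      (by omega) (by rw [hfd]; omega)]
    rw [aLoopL_skip l _ _ ?side]
    case side =>
      intro p hp
      rw [PySem.List.mem_pyRange_one] at hp
      exact ⟨by omega, by omega⟩
    apply loop_agree
    intro p hp
    rw [PySem.List.mem_pyRange_one, hfd] at hp
    exact ⟨hp.1, by omega⟩

theorem detect_cycle_start_changed : Claim_changed_detect_cycle_start := by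
  unfold Claim_changed_detect_cycle_start; decide

theorem detect_cycle_start_tight : Claim_exact_detect_cycle_start := by
  unfold Claim_exact_detect_cycle_start
  intro l m _hdom hD
  unfold D_detect_cycle_start at hD
  have hn : (0:Int) ≤ (l.length : Int) := by positivity
  have hm : m ≤ 0 := by omega
  rw [a_in_D l m hD]
  intro hEq
  have hEq2 : (some ((l.length : Int) - 3 * m), (some m : Option Int))
      = bScan (zArray l.reverse) (l.length : Int)
        (PySem.List.pyRange (max m 1) (PySem.Int.floordiv (l.length : Int) 2 + 1) 1) := hEq
  rcases bScan_shape (zArray l.reverse) (l.length : Int)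
      (PySem.List.pyRange (max m 1) (PySem.Int.floordiv (l.length : Int) 2 + 1) 1)
    with h0 | ⟨c, p, hp, he⟩
  · rw [h0, Prod.mk.injEq] at hEq2
    exact absurd hEq2.2 (by simp)
  · rw [he, Prod.mk.injEq] at hEq2
    have hmp : m = p := Option.some.inj hEq2.2
    rw [PySem.List.mem_pyRange_one] at hp
    omega
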